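-- pv_equiv track=rewrite | github.com/Aerospike-langgraph/fraud_investigation | backend/workflow/nodes/alert_validation.py | _determine_trigger_rule
-- ===== SOURCE A (Python) =====
-- from typing import Dict, Any
--
-- def _determine_trigger_rule(flag_reason: str) -> Dict[str, str]:
--     """Determine the alert trigger rule based on flag reason."""
--     flag_reason_lower = flag_reason.lower()
--
--     if any(kw in flag_reason_lower for kw in ["device", "fingerprint", "browser"]):
--         return {"type": "RT2", "name": "Flagged Device Detection"}
--     elif any(kw in flag_reason_lower for kw in ["supernode", "sender", "connection", "network"]):
--         return {"type": "RT3", "name": "Supernode Detection"}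
--     elif any(kw in flag_reason_lower for kw in ["velocity", "rapid", "succession"]):
--         return {"type": "RT1", "name": "Velocity Spike Detection"}
--     elif any(kw in flag_reason_lower for kw in ["amount", "high-value", "threshold"]):
--         return {"type": "RT1", "name": "Transaction Amount Threshold"}
--     elif any(kw in flag_reason_lower for kw in ["pattern", "anomaly", "unusual"]):
--         return {"type": "ML", "name": "Pattern Anomaly Detection"}
--     else:
--         return {"type": "MANUAL", "name": "Manual Review Request"}
-- ===== SOURCE B (Python) =====
-- from typing import Dict, Any
--
-- # keyword -> priority (group index); lower priority wins
-- _KEYWORD_PRIORITY = {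
--     "device": 0, "fingerprint": 0, "browser": 0,
--     "supernode": 1, "sender": 1, "connection": 1, "network": 1,
--     "velocity": 2, "rapid": 2, "succession": 2,
--     "amount": 3, "high-value": 3, "threshold": 3,
--     "pattern": 4, "anomaly": 4, "unusual": 4,
-- }
--
-- _OUTPUTS = [
--     {"type": "RT2", "name": "Flagged Device Detection"},
--     {"type": "RT3", "name": "Supernode Detection"},
--     {"type": "RT1", "name": "Velocity Spike Detection"},
--     {"type": "RT1", "name": "Transaction Amount Threshold"},
--     {"type": "ML", "name": "Pattern Anomaly Detection"},
--     {"type": "MANUAL", "name": "Manual Review Request"},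
-- ]
--
-- def _determine_trigger_rule(flag_reason: str) -> Dict[str, str]:
--     """Pick the rule with the minimum priority among all matching keywords."""
--     lowered = flag_reason.lower()
--     best = 5  # manual review
--     for kw, pri in _KEYWORD_PRIORITY.items():
--         if pri < best and kw in lowered:
--             best = pri
--     return dict(_OUTPUTS[best])
-- ===== Notes on version B (the rewrite author's own statement) =====
-- stated objective: alternative
-- what changed: Replaced the ordered if/elif first-match over keyword groups by a single fold over a flat keyword->priority map that computes the minimum priority among all matching keywords and then indexes an output table by that minimum.
import Mathlib
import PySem

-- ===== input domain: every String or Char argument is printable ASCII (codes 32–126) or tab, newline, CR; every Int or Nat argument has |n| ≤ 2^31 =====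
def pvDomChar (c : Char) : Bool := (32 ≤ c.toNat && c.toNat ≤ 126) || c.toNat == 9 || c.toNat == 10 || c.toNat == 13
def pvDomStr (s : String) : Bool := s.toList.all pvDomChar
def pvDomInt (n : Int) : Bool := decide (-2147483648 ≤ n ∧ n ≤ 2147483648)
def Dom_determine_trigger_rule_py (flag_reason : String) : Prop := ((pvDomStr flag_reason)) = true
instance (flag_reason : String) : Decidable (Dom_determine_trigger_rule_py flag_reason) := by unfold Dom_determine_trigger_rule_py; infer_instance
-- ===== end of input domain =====

-- B replaces A's ordered if/elif first-match cascade by a min-priority fold over a flat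
-- keyword->priority map followed by a table lookup (alternative decomposition, same cost).

-- ===== PORT A =====
def determine_trigger_rule_py (flag_reason : String) : List (String × String) :=
  let flag_reason_lower := PySem.Str.lower flag_reason
  if ["device", "fingerprint", "browser"].any (fun kw => PySem.Str.isIn kw flag_reason_lower) then
    [("type", "RT2"), ("name", "Flagged Device Detection")]
  else if ["supernode", "sender", "connection", "network"].any (fun kw => PySem.Str.isIn kw flag_reason_lower) then
    [("type", "RT3"), ("name", "Supernode Detection")]
  else if ["velocity", "rapid", "succession"].any (fun kw => PySem.Str.isIn kw flag_reason_lower) then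
    [("type", "RT1"), ("name", "Velocity Spike Detection")]
  else if ["amount", "high-value", "threshold"].any (fun kw => PySem.Str.isIn kw flag_reason_lower) then
    [("type", "RT1"), ("name", "Transaction Amount Threshold")]
  else if ["pattern", "anomaly", "unusual"].any (fun kw => PySem.Str.isIn kw flag_reason_lower) then
    [("type", "ML"), ("name", "Pattern Anomaly Detection")]
  else
    [("type", "MANUAL"), ("name", "Manual Review Request")]

-- ===== PORT B =====
-- flat keyword -> priority map (insertion order of the Python dict)
def pvKeywordPriority : List (String × Nat) :=
  [ ("device", 0), ("fingerprint", 0), ("browser", 0)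
  , ("supernode", 1), ("sender", 1), ("connection", 1), ("network", 1)
  , ("velocity", 2), ("rapid", 2), ("succession", 2)
  , ("amount", 3), ("high-value", 3), ("threshold", 3)
  , ("pattern", 4), ("anomaly", 4), ("unusual", 4) ]

def pvOutputs : List (List (String × String)) :=
  [ [("type", "RT2"), ("name", "Flagged Device Detection")]
  , [("type", "RT3"), ("name", "Supernode Detection")]
  , [("type", "RT1"), ("name", "Velocity Spike Detection")]
  , [("type", "RT1"), ("name", "Transaction Amount Threshold")]
  , [("type", "ML"), ("name", "Pattern Anomaly Detection")]
  , [("type", "MANUAL"), ("name", "Manual Review Request")] ]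

def determine_trigger_rule_py_alt (flag_reason : String) : List (String × String) :=
  let lowered := PySem.Str.lower flag_reason
  let best := pvKeywordPriority.foldl
    (fun best p => if p.2 < best && PySem.Str.isIn p.1 lowered then p.2 else best) 5
  pvOutputs.getD best []

-- ===== PRECONDITION & SPEC =====
def Spec_determine_trigger_rule_py (flag_reason : String) (out : List (String × String)) : Prop := out = determine_trigger_rule_py_alt flag_reason
instance (flag_reason : String) (out : List (String × String)) : Decidable (Spec_determine_trigger_rule_py flag_reason out) := by unfold Spec_determine_trigger_rule_py; infer_instance

-- ===== CLAIM =====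
def Claim_equal_determine_trigger_rule_py : Prop := ∀ (flag_reason : String), Dom_determine_trigger_rule_py flag_reason → Spec_determine_trigger_rule_py flag_reason (determine_trigger_rule_py flag_reason)

-- ===== LEMMAS AND PROOFS =====

-- the fold step of B's port, named for the lemmas
def pvStep (lowered : String) (best : Nat) (p : String × Nat) : Nat :=
  if p.2 < best && PySem.Str.isIn p.1 lowered then p.2 else best

theorem pvStep_eq (lowered : String) :
    (fun best (p : String × Nat) => if p.2 < best && PySem.Str.isIn p.1 lowered then p.2 else best)
      = pvStep lowered := rfl

-- folding one same-priority group = one guarded any-test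
theorem pv_foldl_group (lowered : String) (kws : List String) (p best : Nat) :
    (kws.map (fun k => (k, p))).foldl (pvStep lowered) best
      = if p < best && kws.any (fun kw => PySem.Str.isIn kw lowered) then p else best := by
  induction kws generalizing best with
  | nil => simp
  | cons k t ih =>
    simp only [List.map_cons, List.foldl_cons, ih, pvStep, List.any_cons]
    rcases Bool.eq_false_or_eq_true (PySem.Str.isIn k lowered) with hk | hk <;>
      simp only [hk] <;> by_cases hb : p < best <;> simp [hb]

-- pvKeywordPriority written as its five priority groups
theorem pvKeywordPriority_groups :
    pvKeywordPriority
      = (["device", "fingerprint", "browser"].map (fun k => (k, 0)))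
        ++ (["supernode", "sender", "connection", "network"].map (fun k => (k, 1)))
        ++ (["velocity", "rapid", "succession"].map (fun k => (k, 2)))
        ++ (["amount", "high-value", "threshold"].map (fun k => (k, 3)))
        ++ (["pattern", "anomaly", "unusual"].map (fun k => (k, 4))) := rfl

-- ===== VERDICT =====
theorem determine_trigger_rule_py_spec : Claim_equal_determine_trigger_rule_py := by
  intro flag_reason _
  show determine_trigger_rule_py flag_reason = determine_trigger_rule_py_alt flag_reason
  simp only [determine_trigger_rule_py, determine_trigger_rule_py_alt,
    pvKeywordPriority_groups, pvStep_eq, List.foldl_append, pv_foldl_group]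
  generalize ["device", "fingerprint", "browser"].any
      (fun kw => PySem.Str.isIn kw (PySem.Str.lower flag_reason)) = g1
  generalize ["supernode", "sender", "connection", "network"].any
      (fun kw => PySem.Str.isIn kw (PySem.Str.lower flag_reason)) = g2
  generalize ["velocity", "rapid", "succession"].any
      (fun kw => PySem.Str.isIn kw (PySem.Str.lower flag_reason)) = g3
  generalize ["amount", "high-value", "threshold"].any
      (fun kw => PySem.Str.isIn kw (PySem.Str.lower flag_reason)) = g4
  generalize ["pattern", "anomaly", "unusual"].any
      (fun kw => PySem.Str.isIn kw (PySem.Str.lower flag_reason)) = g5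
  cases g1 <;> cases g2 <;> cases g3 <;> cases g4 <;> cases g5 <;> simp [pvOutputs]
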